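-- pv_equiv track=rewrite | github.com/1xiaosongz/lll | 5860.py | simple_extract
-- ===== SOURCE A (Python) =====
-- def simple_extract(arr):
--     """
--     简化版本：执行两次差值计算并提取元素
--     """
--
--     def one_pass(current_arr):
--         extracted = []
--         i = 0
--         while i < len(current_arr) - 1:
--             if 800 < current_arr[i + 1] - current_arr[i] < 900:
--                 extracted.append(current_arr[i + 1])
--                 current_arr.pop(i + 1)
--             else:
--                 i += 1
--         return extracted
--
--     remaining = arr.copy()
--     first_extracted = one_pass(remaining)
--     second_extracted = one_pass(remaining)
--
--     return remaining, first_extracted + second_extracted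
-- ===== SOURCE B (Python) =====
-- def simple_extract(arr):
--     def sweep(xs):
--         kept = []
--         ext = []
--         for x in xs:
--             if kept and 800 < x - kept[-1] < 900:
--                 ext.append(x)
--             else:
--                 kept.append(x)
--         return kept, ext
--     r1, e1 = sweep(arr)
--     r2, e2 = sweep(r1)
--     return r2, e1 + e2
-- ===== Notes on version B (the rewrite author's own statement) =====
-- stated objective: faster
-- what changed: B replaces A's index-and-pop while loop (quadratic pops restarting the comparison at the same index) with a single streaming pass that compares each element to the last kept element, run twice.
import Mathlib
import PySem

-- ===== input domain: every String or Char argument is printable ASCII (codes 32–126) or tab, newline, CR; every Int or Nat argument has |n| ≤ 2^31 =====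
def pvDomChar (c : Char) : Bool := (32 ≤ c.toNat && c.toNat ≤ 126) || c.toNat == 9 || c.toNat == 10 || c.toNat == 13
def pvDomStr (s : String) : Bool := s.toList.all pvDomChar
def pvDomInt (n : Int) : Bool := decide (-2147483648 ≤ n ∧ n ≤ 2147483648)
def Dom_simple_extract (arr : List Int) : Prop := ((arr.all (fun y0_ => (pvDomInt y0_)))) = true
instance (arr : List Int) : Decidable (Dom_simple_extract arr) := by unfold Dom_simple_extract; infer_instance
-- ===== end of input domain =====

-- B replaces A's index-and-pop while loop with a single streaming pass against the last kept element (objective: faster).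

-- ===== PORT A =====
-- A's while loop over (current_arr, i): pop at i+1 keeps i, else i += 1.
-- Returns (remaining list, extracted list); mutation of current_arr is threaded explicitly.
def onePassA (cur : List Int) (i : Nat) : List Int × List Int :=
  if h : i < cur.length - 1 then
    let d := cur.getD (i + 1) 0 - cur.getD i 0
    if 800 < d ∧ d < 900 then
      let r := onePassA (cur.eraseIdx (i + 1)) i
      (r.1, cur.getD (i + 1) 0 :: r.2)
    else
      onePassA cur (i + 1)
  else (cur, [])
termination_by cur.length - i
decreasing_by
  · simp only [List.length_eraseIdx]; split <;> omega
  · omega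

def simple_extract (arr : List Int) : List Int × List Int :=
  let p1 := onePassA arr 0
  let p2 := onePassA p1.1 0
  (p2.1, p1.2 ++ p2.2)

-- ===== PORT B =====
-- B's streaming pass: compare each x to the last kept element.
def sweepB (xs : List Int) : List Int × List Int :=
  xs.foldl (fun (p : List Int × List Int) x =>
    match p.1.getLast? with
    | some l => if 800 < x - l ∧ x - l < 900 then (p.1, p.2 ++ [x]) else (p.1 ++ [x], p.2)
    | none => (p.1 ++ [x], p.2)) ([], [])

def simple_extract_alt (arr : List Int) : List Int × List Int :=
  let p1 := sweepB arr
  let p2 := sweepB p1.1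
  (p2.1, p1.2 ++ p2.2)

-- ===== PRECONDITION & SPEC =====
def Spec_simple_extract (arr : List Int) (out : List Int × List Int) : Prop := out = simple_extract_alt arr
instance (arr : List Int) (out : List Int × List Int) : Decidable (Spec_simple_extract arr out) := by unfold Spec_simple_extract; infer_instance

-- ===== CLAIM (what is proved, stated in full; the proofs are below) =====
def Claim_equal_simple_extract : Prop := ∀ (arr : List Int), Dom_simple_extract arr → Spec_simple_extract arr (simple_extract arr)

-- ===== LEMMAS AND PROOFS =====

-- reference recursion: process `rest` with anchor `a`, returning (remaining after a, extracted)
def sweepRec (a : Int) : List Int → List Int × List Int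
  | [] => ([], [])
  | y :: ys =>
    if 800 < y - a ∧ y - a < 900 then
      let r := sweepRec a ys
      (r.1, y :: r.2)
    else
      let r := sweepRec y ys
      (y :: r.1, r.2)

lemma getD_append_len (l : List Int) (x : Int) (r : List Int) :
    (l ++ x :: r).getD l.length 0 = x := by
  induction l with
  | nil => simp
  | cons a t ih => simp [ih]

lemma eraseIdx_append_len (l : List Int) (x y : Int) (r : List Int) :
    (l ++ x :: y :: r).eraseIdx (l.length + 1) = l ++ x :: r := by
  induction l with
  | nil => simp
  | cons a t ih => simp [ih]

lemma onePassA_eq (rest : List Int) : ∀ (kept : List Int) (x : Int),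
    onePassA (kept ++ x :: rest) kept.length =
      (kept ++ x :: (sweepRec x rest).1, (sweepRec x rest).2) := by
  induction rest with
  | nil =>
    intro kept x
    rw [onePassA]
    simp [sweepRec]
  | cons y ys ih =>
    intro kept x
    rw [onePassA]
    have hl : kept.length < (kept ++ x :: y :: ys).length - 1 := by
      simp only [List.length_append, List.length_cons]; omega
    have h1 : (kept ++ x :: y :: ys).getD kept.length 0 = x := getD_append_len _ _ _
    have h2 : (kept ++ x :: y :: ys).getD (kept.length + 1) 0 = y := by
      have := getD_append_len (kept ++ [x]) y ys
      simpa using this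
    simp only [hl, h1, h2, dif_pos]
    by_cases hc : 800 < y - x ∧ y - x < 900
    · rw [if_pos hc, eraseIdx_append_len, ih kept x]
      simp [sweepRec, hc]
    · rw [if_neg hc]
      have := ih (kept ++ [x]) y
      simp only [List.length_append, List.length_cons, List.length_nil] at this
      simp only [List.append_assoc, List.cons_append, List.nil_append] at this
      rw [this]
      simp [sweepRec, hc]

def sweepStep : List Int × List Int → Int → List Int × List Int :=
  fun p x =>
    match p.1.getLast? with
    | some l => if 800 < x - l ∧ x - l < 900 then (p.1, p.2 ++ [x]) else (p.1 ++ [x], p.2)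
    | none => (p.1 ++ [x], p.2)

lemma sweepB_loop (xs : List Int) : ∀ (kept ext : List Int) (a : Int),
    kept.getLast? = some a →
    xs.foldl sweepStep (kept, ext) =
      (kept ++ (sweepRec a xs).1, ext ++ (sweepRec a xs).2) := by
  induction xs with
  | nil => intro kept ext a _; simp [sweepRec]
  | cons y ys ih =>
    intro kept ext a h
    by_cases hc : 800 < y - a ∧ y - a < 900
    · have hs : sweepStep (kept, ext) y = (kept, ext ++ [y]) := by
        simp [sweepStep, h, hc]
      rw [List.foldl_cons, hs, ih kept (ext ++ [y]) a h]
      simp [sweepRec, hc]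
    · have hs : sweepStep (kept, ext) y = (kept ++ [y], ext) := by
        simp [sweepStep, h, hc]
      have hlast : (kept ++ [y]).getLast? = some y := by simp
      rw [List.foldl_cons, hs, ih (kept ++ [y]) ext y hlast]
      simp [sweepRec, hc]

lemma sweepB_eq : ∀ (xs : List Int),
    sweepB xs = match xs with
      | [] => ([], [])
      | x :: rest => (x :: (sweepRec x rest).1, (sweepRec x rest).2) := by
  intro xs
  cases xs with
  | nil => simp [sweepB]
  | cons x rest =>
    show (x :: rest).foldl sweepStep ([], []) = _
    simp only [List.foldl_cons, sweepStep]
    have h : ([x] : List Int).getLast? = some x := by simp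
    have := sweepB_loop rest [x] [] x h
    simpa using this

lemma onePass_eq_sweepB (xs : List Int) : onePassA xs 0 = sweepB xs := by
  cases xs with
  | nil => rw [onePassA, sweepB_eq]; simp
  | cons x rest =>
    have := onePassA_eq rest [] x
    simp only [List.nil_append, List.length_nil] at this
    rw [this, sweepB_eq]

-- ===== VERDICT (by name: the statement is the Claim_ definition above) =====
theorem simple_extract_spec : Claim_equal_simple_extract := by
  intro arr _
  unfold Spec_simple_extract
  simp only [simple_extract, simple_extract_alt, onePass_eq_sweepB]
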